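-- pv_equiv track=rewrite | github.com/m00sfett/stringen | stringen/utils.py | recognized_base
-- ===== SOURCE A (Python) =====
-- import string
--
-- def recognized_base(text: str) -> int:
--     """Return recognized numeric base of the given text.
--
--     The smallest base capable of representing all characters is returned.
--     Hexadecimal is only detected when letters ``a``-``f`` or ``A``-``F`` are
--     present.
--     """
--     if not text:
--         return 0
--     hex_chars = set("0123456789abcdefABCDEF")
--     text_set = set(text)
--     if text_set <= hex_chars and any(c.isalpha() for c in text):
--         return 16
--     if text_set <= {"0", "1"}:
--         return 2
--     if text_set <= set("01234567"):
--         return 8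
--     if text_set <= set(string.digits):
--         return 10
--     return 0
-- ===== SOURCE B (Python) =====
-- def recognized_base(text: str) -> int:
--     """Single pass: classify each character, then read the answer off the flags."""
--     invalid = False
--     has_hex_letter = False
--     max_class = 0
--     for c in text:
--         if c in "01":
--             max_class = max(max_class, 2)
--         elif c in "234567":
--             max_class = max(max_class, 8)
--         elif c in "89":
--             max_class = max(max_class, 10)
--         elif c in "abcdefABCDEF":
--             has_hex_letter = True
--         else:
--             invalid = True
--     if not text or invalid:
--         return 0
--     if has_hex_letter:
--         return 16
--     return max_class
-- ===== Notes on version B (the rewrite author's own statement) =====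
-- stated objective: alternative
-- what changed: Replaces the four set constructions and subset tests (plus a separate isalpha scan) with a single pass over the text maintaining an invalid flag, a hex-letter flag and the maximal digit class, from which the base is read off; same O(n) cost, no intermediate sets.
import Mathlib
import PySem

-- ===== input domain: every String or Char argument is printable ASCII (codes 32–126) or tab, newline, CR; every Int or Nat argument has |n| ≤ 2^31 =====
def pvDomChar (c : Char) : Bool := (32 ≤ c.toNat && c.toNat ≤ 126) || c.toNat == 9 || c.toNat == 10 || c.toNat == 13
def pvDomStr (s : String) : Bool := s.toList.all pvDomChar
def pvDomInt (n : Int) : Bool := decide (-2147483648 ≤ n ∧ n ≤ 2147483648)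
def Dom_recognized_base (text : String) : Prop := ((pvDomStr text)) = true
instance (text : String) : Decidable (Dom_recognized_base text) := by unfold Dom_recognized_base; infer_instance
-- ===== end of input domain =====

-- B replaces A's set constructions and subset tests with a single pass keeping an invalid
-- flag, a hex-letter flag and the maximal digit class (objective: alternative decomposition).

-- ===== PORT A =====
def rbHexChars : PySem.Set Char :=
  PySem.Set.ofList ['0','1','2','3','4','5','6','7','8','9','a','b','c','d','e','f','A','B','C','D','E','F']

def recognized_base (text : String) : Int :=
  if text.toList.isEmpty then 0
  else if PySem.Set.issubset (PySem.Set.ofList text.toList) rbHexChars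
          && text.toList.any PySem.Chars.isalpha then 16
  else if PySem.Set.issubset (PySem.Set.ofList text.toList) (PySem.Set.ofList ['0','1']) then 2
  else if PySem.Set.issubset (PySem.Set.ofList text.toList)
          (PySem.Set.ofList ['0','1','2','3','4','5','6','7']) then 8
  else if PySem.Set.issubset (PySem.Set.ofList text.toList)
          (PySem.Set.ofList ['0','1','2','3','4','5','6','7','8','9']) then 10
  else 0

-- ===== PORT B =====
-- the four membership tests B makes ('c in "01"', …)
def rbIs01 (c : Char) : Bool := ['0','1'].contains c
def rbIs27 (c : Char) : Bool := ['2','3','4','5','6','7'].contains c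
def rbIs89 (c : Char) : Bool := ['8','9'].contains c
def rbIsHexLetter (c : Char) : Bool := ['a','b','c','d','e','f','A','B','C','D','E','F'].contains c

-- loop body; state = (invalid, has_hex_letter, max_class)
def rbStep (st : Bool × Bool × Int) (c : Char) : Bool × Bool × Int :=
  if rbIs01 c then (st.1, st.2.1, max st.2.2 2)
  else if rbIs27 c then (st.1, st.2.1, max st.2.2 8)
  else if rbIs89 c then (st.1, st.2.1, max st.2.2 10)
  else if rbIsHexLetter c then (st.1, true, st.2.2)
  else (true, st.2.1, st.2.2)

def recognized_base_alt (text : String) : Int :=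
  if text.toList.isEmpty || (text.toList.foldl rbStep (false, false, 0)).1 then 0
  else if (text.toList.foldl rbStep (false, false, 0)).2.1 then 16
  else (text.toList.foldl rbStep (false, false, 0)).2.2

-- ===== PRECONDITION & SPEC =====
def Spec_recognized_base (text : String) (out : Int) : Prop := out = recognized_base_alt text
instance (text : String) (out : Int) : Decidable (Spec_recognized_base text out) := by unfold Spec_recognized_base; infer_instance

-- ===== CLAIM (what is proved, stated in full; the proofs are below) =====
def Claim_equal_recognized_base : Prop := ∀ (text : String), Dom_recognized_base text → Spec_recognized_base text (recognized_base text)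

-- ===== LEMMAS AND PROOFS =====

def rbInv (c : Char) : Bool := !(rbIs01 c || rbIs27 c || rbIs89 c || rbIsHexLetter c)
def rbStepM (m : Int) (c : Char) : Int :=
  if rbIs01 c then max m 2 else if rbIs27 c then max m 8 else if rbIs89 c then max m 10 else m
def rbMspec (cs : List Char) : Int :=
  if cs.any rbIs89 then 10 else if cs.any rbIs27 then 8 else if cs.any rbIs01 then 2 else 0

lemma any_false {p : Char → Bool} {cs : List Char} (h : cs.any p = false) :
    ∀ x ∈ cs, p x = false := by
  intro x hx
  simpa using List.any_eq_false.mp h x hx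

lemma mem01 {c : Char} (h : rbIs01 c = true) : c ∈ ['0', '1'] := by simpa [rbIs01] using h
lemma mem27 {c : Char} (h : rbIs27 c = true) : c ∈ ['2','3','4','5','6','7'] := by
  simpa [rbIs27] using h
lemma mem89 {c : Char} (h : rbIs89 c = true) : c ∈ ['8', '9'] := by simpa [rbIs89] using h
lemma memL {c : Char} (h : rbIsHexLetter c = true) :
    c ∈ ['a','b','c','d','e','f','A','B','C','D','E','F'] := by simpa [rbIsHexLetter] using h

lemma disj01 {c : Char} (h : rbIs01 c = true) :
    rbIs27 c = false ∧ rbIs89 c = false ∧ rbIsHexLetter c = false := by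
  have hm := mem01 h
  fin_cases hm <;> exact ⟨by decide, by decide, by decide⟩
lemma disj27 {c : Char} (h : rbIs27 c = true) :
    rbIs89 c = false ∧ rbIsHexLetter c = false := by
  have hm := mem27 h
  fin_cases hm <;> exact ⟨by decide, by decide⟩
lemma disj89 {c : Char} (h : rbIs89 c = true) : rbIsHexLetter c = false := by
  have hm := mem89 h
  fin_cases hm <;> decide

lemma rb_fold (cs : List Char) : ∀ (b1 b2 : Bool) (m : Int),
    cs.foldl rbStep (b1, b2, m) =
      (b1 || cs.any rbInv, b2 || cs.any rbIsHexLetter, cs.foldl rbStepM m) := by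
  induction cs with
  | nil => simp
  | cons c cs ih =>
    intro b1 b2 m
    simp only [List.foldl_cons, List.any_cons]
    by_cases h1 : rbIs01 c = true
    · obtain ⟨e2, e3, e4⟩ := disj01 h1
      simp [rbStep, rbStepM, rbInv, h1, e2, e3, e4, ih]
    · by_cases h2 : rbIs27 c = true
      · obtain ⟨e3, e4⟩ := disj27 h2
        simp [rbStep, rbStepM, rbInv, h1, h2, e3, e4, ih]
      · by_cases h3 : rbIs89 c = true
        · have e4 := disj89 h3
          simp [rbStep, rbStepM, rbInv, h1, h2, h3, e4, ih]
        · by_cases h4 : rbIsHexLetter c = true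
          · simp [rbStep, rbStepM, rbInv, h1, h2, h3, h4, ih]
          · simp [rbStep, rbStepM, rbInv, h1, h2, h3, h4, ih]

lemma rb_foldM (cs : List Char) : ∀ m : Int, 0 ≤ m →
    cs.foldl rbStepM m = max m (rbMspec cs) := by
  induction cs with
  | nil => intro m hm; simp [rbMspec]; omega
  | cons c cs ih =>
    intro m hm
    rw [List.foldl_cons]
    have hstep : 0 ≤ rbStepM m c := by unfold rbStepM; split_ifs <;> omega
    rw [ih _ hstep]
    by_cases h1 : rbIs01 c = true
    · obtain ⟨e2, e3, e4⟩ := disj01 h1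
      simp [rbStepM, rbMspec, List.any_cons, h1, e2, e3]
      all_goals first | omega | (split_ifs <;> omega)
    · by_cases h2 : rbIs27 c = true
      · obtain ⟨e3, e4⟩ := disj27 h2
        simp [rbStepM, rbMspec, List.any_cons, h1, h2, e3]
        all_goals first | omega | (split_ifs <;> omega)
      · by_cases h3 : rbIs89 c = true
        · simp [rbStepM, rbMspec, List.any_cons, h1, h2, h3]
          all_goals first | omega | (split_ifs <;> omega)
        · simp [rbStepM, rbMspec, List.any_cons, h1, h2, h3]
          all_goals first | omega | (split_ifs <;> omega)

lemma mem_hex_iff (c : Char) :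
    c ∈ rbHexChars ↔ (rbIs01 c || rbIs27 c || rbIs89 c || rbIsHexLetter c) = true := by
  simp [rbHexChars, PySem.Set.mem_ofList, rbIs01, rbIs27, rbIs89, rbIsHexLetter]
  tauto

lemma pL_isalpha {c : Char} (h : rbIsHexLetter c = true) : PySem.Chars.isalpha c = true := by
  have hm := memL h
  fin_cases hm <;> decide

lemma digit_mem09 {c : Char} (h : (rbIs01 c || rbIs27 c || rbIs89 c) = true) :
    c ∈ ['0','1','2','3','4','5','6','7','8','9'] := by
  rcases Bool.or_eq_true_iff.mp h with h' | h3
  · rcases Bool.or_eq_true_iff.mp h' with h1 | h2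
    · have hm := mem01 h1; fin_cases hm <;> decide
    · have hm := mem27 h2; fin_cases hm <;> decide
  · have hm := mem89 h3; fin_cases hm <;> decide

lemma digit_not_isalpha {c : Char} (h : (rbIs01 c || rbIs27 c || rbIs89 c) = true) :
    PySem.Chars.isalpha c = false := by
  have hm := digit_mem09 h
  fin_cases hm <;> decide

lemma sub_iff (cs : List Char) (t : PySem.Set Char) :
    PySem.Set.issubset (PySem.Set.ofList cs) t = true ↔ ∀ x ∈ cs, x ∈ t := by
  rw [PySem.Set.issubset_iff]
  constructor
  · intro h x hx; exact h x ((PySem.Set.mem_ofList _ _).mpr hx)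
  · intro h x hx; exact h x ((PySem.Set.mem_ofList _ _).mp hx)

lemma sub_false_of_witness (cs : List Char) (t : PySem.Set Char) {c : Char}
    (hc : c ∈ cs) (hnot : c ∉ t) :
    PySem.Set.issubset (PySem.Set.ofList cs) t = false := by
  rw [Bool.eq_false_iff]
  intro h
  exact hnot ((sub_iff cs t).mp h c hc)

-- ===== VERDICT (by name: the statement is the Claim_ definition above) =====
theorem recognized_base_spec : Claim_equal_recognized_base := by
  intro text _
  unfold Spec_recognized_base recognized_base recognized_base_alt
  generalize text.toList = cs
  rw [rb_fold cs false false 0, rb_foldM cs 0 le_rfl]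
  simp only [Bool.false_or]
  by_cases hE : cs.isEmpty
  · simp [hE]
  simp only [hE, Bool.false_or, if_false]
  by_cases hI : cs.any rbInv = true
  · -- some char outside the hex set: all of A's subset tests fail, B returns 0
    obtain ⟨c, hc, hcp⟩ := List.any_eq_true.mp hI
    have hnot : c ∉ rbHexChars := by
      intro h
      rw [mem_hex_iff] at h
      simp [rbInv, h] at hcp
    have hn01 : c ∉ PySem.Set.ofList ['0','1'] := by
      intro h
      refine hnot ((mem_hex_iff c).mpr ?_)
      have hm := (PySem.Set.mem_ofList _ _).mp h
      fin_cases hm <;> decide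
    have hn07 : c ∉ PySem.Set.ofList ['0','1','2','3','4','5','6','7'] := by
      intro h
      refine hnot ((mem_hex_iff c).mpr ?_)
      have hm := (PySem.Set.mem_ofList _ _).mp h
      fin_cases hm <;> decide
    have hn09 : c ∉ PySem.Set.ofList ['0','1','2','3','4','5','6','7','8','9'] := by
      intro h
      refine hnot ((mem_hex_iff c).mpr ?_)
      have hm := (PySem.Set.mem_ofList _ _).mp h
      fin_cases hm <;> decide
    rw [sub_false_of_witness cs rbHexChars hc hnot,
        sub_false_of_witness cs _ hc hn01,
        sub_false_of_witness cs _ hc hn07,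
        sub_false_of_witness cs _ hc hn09]
    simp [hI]
  · -- every char is a hex char
    rw [Bool.not_eq_true] at hI
    have hIf := any_false hI
    have hall : ∀ c ∈ cs, (rbIs01 c || rbIs27 c || rbIs89 c || rbIsHexLetter c) = true := by
      intro c hc
      have h := hIf c hc
      by_contra hcon
      rw [Bool.not_eq_true] at hcon
      simp [rbInv, hcon] at h
    have hsubhex : PySem.Set.issubset (PySem.Set.ofList cs) rbHexChars = true := by
      rw [sub_iff]
      intro x hx
      exact (mem_hex_iff x).mpr (hall x hx)
    simp only [hI, if_false, hsubhex, Bool.true_and]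
    by_cases hL : cs.any rbIsHexLetter = true
    · -- a hex letter is present: both return 16
      have halpha : cs.any PySem.Chars.isalpha = true := by
        obtain ⟨c, hc, hcp⟩ := List.any_eq_true.mp hL
        exact List.any_eq_true.mpr ⟨c, hc, pL_isalpha hcp⟩
      simp [halpha, hL]
    · -- all digits: the three subset tests compute exactly the maximal class
      rw [Bool.not_eq_true] at hL
      have hLf := any_false hL
      have hdig : ∀ c ∈ cs, (rbIs01 c || rbIs27 c || rbIs89 c) = true := by
        intro c hc
        have := hall c hc
        simpa [hLf c hc] using this
      have halpha : cs.any PySem.Chars.isalpha = false := by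
        apply List.any_eq_false.mpr
        intro c hc
        simp [digit_not_isalpha (hdig c hc)]
      simp only [halpha, if_false, hL, rbMspec]
      by_cases h89 : cs.any rbIs89 = true
      · obtain ⟨c, hc, hcp⟩ := List.any_eq_true.mp h89
        have h2 := sub_false_of_witness cs (PySem.Set.ofList ['0','1']) hc
          (by rw [PySem.Set.mem_ofList]; have hm := mem89 hcp; fin_cases hm <;> decide)
        have h8 := sub_false_of_witness cs (PySem.Set.ofList ['0','1','2','3','4','5','6','7'])
          hc (by rw [PySem.Set.mem_ofList]; have hm := mem89 hcp; fin_cases hm <;> decide)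
        have h10 : PySem.Set.issubset (PySem.Set.ofList cs)
            (PySem.Set.ofList ['0','1','2','3','4','5','6','7','8','9']) = true := by
          rw [sub_iff]
          intro x hx
          rw [PySem.Set.mem_ofList]
          exact digit_mem09 (hdig x hx)
        simp [h2, h8, h10, h89]
      · rw [Bool.not_eq_true] at h89
        have h89f := any_false h89
        by_cases h27 : cs.any rbIs27 = true
        · obtain ⟨c, hc, hcp⟩ := List.any_eq_true.mp h27
          have h2 := sub_false_of_witness cs (PySem.Set.ofList ['0','1']) hc
            (by rw [PySem.Set.mem_ofList]; have hm := mem27 hcp; fin_cases hm <;> decide)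
          have h8 : PySem.Set.issubset (PySem.Set.ofList cs)
              (PySem.Set.ofList ['0','1','2','3','4','5','6','7']) = true := by
            rw [sub_iff]
            intro x hx
            rw [PySem.Set.mem_ofList]
            have hd := hdig x hx
            rw [h89f x hx] at hd
            rcases Bool.or_eq_true_iff.mp (by simpa using hd) with h1' | h2'
            · have hm := mem01 h1'; fin_cases hm <;> decide
            · have hm := mem27 h2'; fin_cases hm <;> decide
          simp [h2, h8, h89, h27]
        · -- only 0/1 digits remain; cs nonempty forces any rbIs01
          rw [Bool.not_eq_true] at h27
          have h27f := any_false h27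
          have h01each : ∀ c ∈ cs, rbIs01 c = true := by
            intro c hc
            have hd := hdig c hc
            rw [h89f c hc, h27f c hc] at hd
            simpa using hd
          have hne : cs ≠ [] := fun h => by simp [h] at hE
          obtain ⟨c, hc⟩ := List.exists_mem_of_ne_nil cs hne
          have h01 : cs.any rbIs01 = true :=
            List.any_eq_true.mpr ⟨c, hc, h01each c hc⟩
          have h2 : PySem.Set.issubset (PySem.Set.ofList cs)
              (PySem.Set.ofList ['0','1']) = true := by
            rw [sub_iff]
            intro x hx
            rw [PySem.Set.mem_ofList]
            exact mem01 (h01each x hx)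
          simp [h2, h89, h27, h01]
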